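-- pv_equiv track=rewrite | github.com/dkdranzer/BIS_LAB | Parallel_Cellular_Algorithms_Resource_Allocation.py | update_cell
-- ===== SOURCE A (Python) =====
-- resources = 3              # Number of resources
--
-- def calculate_fitness(grid, task_demands, max_resources):
--     resource_usage = [0] * resources
--     for task, resource in enumerate(grid):
--         resource_usage[resource] += task_demands[task]
--
--     # Penalize over-allocation beyond max_resources
--     penalty = sum(max(0, resource_usage[r] - max_resources[r]) for r in range(resources))
--     return -penalty  # Fitness improves as penalty reduces
--
-- def update_cell(task, grid, task_demands, max_resources, local_interaction_radius):
--     current_state = grid[task]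
--     best_state = current_state
--     best_fitness = calculate_fitness(grid, task_demands, max_resources)
--
--     # Explore neighboring states
--     for new_state in range(resources):
--         temp_grid = grid.copy()
--         temp_grid[task] = new_state
--         new_fitness = calculate_fitness(temp_grid, task_demands, max_resources)
--
--         # Update best state if fitness improves
--         if new_fitness > best_fitness:
--             best_fitness = new_fitness
--             best_state = new_state
--
--     return best_state
-- ===== SOURCE B (Python) =====
-- resources = 3              # Number of resources
--
-- def update_cell(task, grid, task_demands, max_resources, local_interaction_radius):
--     n = len(grid)
--     t = task % n                     # normalize a Python-style (possibly negative) index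
--     current_state = grid[t]
--     demand = task_demands[t]
--
--     # One pass: total demand routed to each resource bucket
--     usage = [0] * resources
--     for i, r in enumerate(grid):
--         usage[r] += task_demands[i]
--
--     def fitness(u):
--         return -sum(max(0, u[r] - max_resources[r]) for r in range(resources))
--
--     best_state = current_state
--     best_fitness = fitness(usage)
--
--     # Each candidate: move this task's demand between two buckets, no grid copy / re-sum
--     for new_state in range(resources):
--         u = usage.copy()
--         u[current_state] -= demand
--         u[new_state] += demand
--         f = fitness(u)
--         if f > best_fitness:
--             best_fitness = f
--             best_state = new_state
--     return best_state
-- ===== Notes on version B (the rewrite author's own statement) =====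
-- stated objective: faster
-- what changed: A copies the grid and re-sums all task demands into the 3 resource buckets for every candidate state; B computes the usage buckets in one pass and evaluates each candidate by moving this task's demand between two buckets of a copied 3-entry usage array.
import Mathlib
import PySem

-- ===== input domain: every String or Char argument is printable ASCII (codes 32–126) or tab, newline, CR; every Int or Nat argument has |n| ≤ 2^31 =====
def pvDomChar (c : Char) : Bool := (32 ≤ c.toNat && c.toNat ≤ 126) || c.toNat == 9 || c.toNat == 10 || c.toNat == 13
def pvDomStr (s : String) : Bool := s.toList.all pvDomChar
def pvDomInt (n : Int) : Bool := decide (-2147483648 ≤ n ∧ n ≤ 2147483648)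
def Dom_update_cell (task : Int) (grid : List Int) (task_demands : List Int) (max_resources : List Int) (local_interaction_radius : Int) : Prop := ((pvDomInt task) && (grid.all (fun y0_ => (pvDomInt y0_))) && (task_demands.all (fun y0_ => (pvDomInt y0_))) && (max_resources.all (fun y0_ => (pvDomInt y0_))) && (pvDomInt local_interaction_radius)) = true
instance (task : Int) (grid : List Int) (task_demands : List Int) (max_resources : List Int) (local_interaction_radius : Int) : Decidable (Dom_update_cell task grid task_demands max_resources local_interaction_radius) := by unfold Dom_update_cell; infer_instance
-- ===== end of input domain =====

-- B replaces A's per-candidate grid copy and full usage re-summation by one usage pass plus a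
-- two-bucket delta adjustment per candidate (objective: faster by a constant factor).

-- ===== PORT A =====

-- `usage[r] += d` on the length-3 usage list: exact Python index assignment for -3 ≤ r < 3
-- (negative index wraps); identity elsewhere (Python raises there; Pre_ excludes it).
def pvBump (u : List Int) (r d : Int) : List Int :=
  match u with
  | [a, b, c] =>
    if r = 0 ∨ r = -3 then [a + d, b, c]
    else if r = 1 ∨ r = -2 then [a, b + d, c]
    else if r = 2 ∨ r = -1 then [a, b, c + d]
    else [a, b, c]
  | u => u

-- `for task, resource in enumerate(grid): resource_usage[resource] += task_demands[task]`
-- (List.zipIdx is Python's enumerate with the pair swapped: (element, index))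
def pvUsage (grid task_demands : List Int) : List Int :=
  grid.zipIdx.foldl
    (fun u p => pvBump u p.1 (PySem.List.pyGetD task_demands (p.2 : Int) 0)) [0, 0, 0]

-- `sum(max(0, resource_usage[r] - max_resources[r]) for r in range(resources))`
def pvPenalty (u max_resources : List Int) : Int :=
  (PySem.List.pyRange 0 3 1).foldl
    (fun s r => s + max 0 (PySem.List.pyGetD u r 0 - PySem.List.pyGetD max_resources r 0)) 0

def calculate_fitness (grid task_demands max_resources : List Int) : Int :=
  -(pvPenalty (pvUsage grid task_demands) max_resources)

def update_cell (task : Int) (grid : List Int) (task_demands : List Int) (max_resources : List Int) (local_interaction_radius : Int) : Int :=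
  let current_state := PySem.List.pyGetD grid task 0
  let r := (PySem.List.pyRange 0 3 1).foldl
    (fun b new_state =>
      let temp_grid := PySem.List.pySetD grid task new_state
      let new_fitness := calculate_fitness temp_grid task_demands max_resources
      if b.2 < new_fitness then (new_state, new_fitness) else b)
    (current_state, calculate_fitness grid task_demands max_resources)
  r.1

-- ===== PORT B =====
def update_cell_alt (task : Int) (grid : List Int) (task_demands : List Int) (max_resources : List Int) (local_interaction_radius : Int) : Int :=
  let n : Int := grid.length
  let t := PySem.Int.mod task n
  let current_state := PySem.List.pyGetD grid t 0
  let demand := PySem.List.pyGetD task_demands t 0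
  let usage := pvUsage grid task_demands
  let r := (PySem.List.pyRange 0 3 1).foldl
    (fun b new_state =>
      let u := pvBump (pvBump usage current_state (-demand)) new_state demand
      let f := -(pvPenalty u max_resources)
      if b.2 < f then (new_state, f) else b)
    (current_state, -(pvPenalty usage max_resources))
  r.1

-- ===== PRECONDITION & SPEC =====
-- Pre_ is exactly where the Python A returns: a valid (possibly negative, Python-style) task
-- index, every grid state a valid index into the 3 usage buckets, demands covering all tasks,
-- and at least 3 max_resources entries; anywhere else A raises IndexError.
def Pre_update_cell (task : Int) (grid : List Int) (task_demands : List Int) (max_resources : List Int) (local_interaction_radius : Int) : Prop :=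
  PySem.Raise.InRange grid.length task ∧ (∀ v ∈ grid, -3 ≤ v ∧ v < 3) ∧
    grid.length ≤ task_demands.length ∧ 3 ≤ max_resources.length
instance (task : Int) (grid : List Int) (task_demands : List Int) (max_resources : List Int) (local_interaction_radius : Int) : Decidable (Pre_update_cell task grid task_demands max_resources local_interaction_radius) := by unfold Pre_update_cell; infer_instance

def pvWitness_update_cell : Int × List Int × List Int × List Int × Int := (0, [0, 1], [3, 4], [2, 2, 2], 1)

def Spec_update_cell (task : Int) (grid : List Int) (task_demands : List Int) (max_resources : List Int) (local_interaction_radius : Int) (out : Int) : Prop := out = update_cell_alt task grid task_demands max_resources local_interaction_radius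
instance (task : Int) (grid : List Int) (task_demands : List Int) (max_resources : List Int) (local_interaction_radius : Int) (out : Int) : Decidable (Spec_update_cell task grid task_demands max_resources local_interaction_radius out) := by unfold Spec_update_cell; infer_instance

-- ===== CLAIM (what is proved, stated in full; the proofs are below) =====
def Claim_equal_update_cell : Prop := ∀ (task : Int) (grid : List Int) (task_demands : List Int) (max_resources : List Int) (local_interaction_radius : Int), Dom_update_cell task grid task_demands max_resources local_interaction_radius → Pre_update_cell task grid task_demands max_resources local_interaction_radius → Spec_update_cell task grid task_demands max_resources local_interaction_radius (update_cell task grid task_demands max_resources local_interaction_radius)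

-- ===== LEMMAS AND PROOFS =====

-- two bump updates commute
theorem pvBump_comm (u : List Int) (r1 d1 r2 d2 : Int) :
    pvBump (pvBump u r1 d1) r2 d2 = pvBump (pvBump u r2 d2) r1 d1 := by
  rcases u with _ | ⟨a, _ | ⟨b, _ | ⟨c, _ | ⟨x, u⟩⟩⟩⟩ <;>
    simp only [pvBump] <;> split_ifs <;> simp_all <;> ring

-- a bump is undone by the opposite bump
theorem pvBump_cancel (u : List Int) (r d : Int) :
    pvBump (pvBump u r d) r (-d) = u := by
  rcases u with _ | ⟨a, _ | ⟨b, _ | ⟨c, _ | ⟨x, u⟩⟩⟩⟩ <;>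
    simp only [pvBump] <;> split_ifs <;> simp_all

-- the usage fold commutes with a bump on the accumulator
theorem pvUsage_fold_bump (td : List Int) (g : List Int) (k : Nat) (u : List Int) (r d : Int) :
    (g.zipIdx k).foldl (fun u p => pvBump u p.1 (PySem.List.pyGetD td (p.2 : Int) 0)) (pvBump u r d)
      = pvBump ((g.zipIdx k).foldl (fun u p => pvBump u p.1 (PySem.List.pyGetD td (p.2 : Int) 0)) u) r d := by
  induction g generalizing k u with
  | nil => simp
  | cons a g ih =>
      simp only [List.zipIdx_cons, List.foldl_cons]
      rw [pvBump_comm, ih]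

-- changing one grid entry moves that task's demand between two buckets of the usage fold
theorem pvUsage_set (td : List Int) (g : List Int) (j k : Nat) (u : List Int) (ns : Int)
    (hj : j < g.length) :
    ((g.set j ns).zipIdx k).foldl (fun u p => pvBump u p.1 (PySem.List.pyGetD td (p.2 : Int) 0)) u
      = pvBump (pvBump ((g.zipIdx k).foldl (fun u p => pvBump u p.1 (PySem.List.pyGetD td (p.2 : Int) 0)) u)
          (g[j]!) (-(PySem.List.pyGetD td ((k + j : Nat) : Int) 0))) ns (PySem.List.pyGetD td ((k + j : Nat) : Int) 0) := by
  induction g generalizing j k u with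
  | nil => simp at hj
  | cons a g ih =>
      cases j with
      | zero =>
          simp only [List.set, List.zipIdx_cons, List.foldl_cons, List.getElem!_cons_zero, Nat.add_zero]
          rw [pvUsage_fold_bump, pvUsage_fold_bump, pvBump_cancel]
      | succ j =>
          simp only [List.set, List.zipIdx_cons, List.foldl_cons, List.getElem!_cons_succ]
          rw [ih j (k + 1) _ (by simpa using hj)]
          norm_num [Nat.add_assoc, Nat.add_comm 1 j]

-- the two ports agree under Pre_
theorem update_cell_eq_alt (task : Int) (grid task_demands max_resources : List Int)
    (lir : Int) (hpre : Pre_update_cell task grid task_demands max_resources lir) :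
    update_cell task grid task_demands max_resources lir
      = update_cell_alt task grid task_demands max_resources lir := by
  obtain ⟨⟨hlo, hhi⟩, _hg, _htd, _hmr⟩ := hpre
  have hn : 0 < grid.length := by
    rcases grid with _ | _
    · simp at hlo hhi; omega
    · simp
  -- the wrapped Nat index j that both `grid[task]` and `task % n` denote
  set j : Nat := if task < 0 then (task + grid.length).toNat else task.toNat with hjdef
  have hjlt : j < grid.length := by
    rw [hjdef]; split_ifs <;> omega
  have hmod : PySem.Int.mod task (grid.length : Int) = (j : Int) := by
    rw [PySem.Int.mod_eq_emod_of_pos (by exact_mod_cast hn), hjdef]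
    split_ifs with hneg
    · have h4 : (task + (grid.length : Int) * 1) % (grid.length : Int) = task % (grid.length : Int) :=
        Int.add_mul_emod_self_left task (grid.length : Int) 1
      rw [← h4]; simp only [mul_one]
      rw [Int.emod_eq_of_lt (by omega) (by omega)]
      omega
    · rw [Int.emod_eq_of_lt (by omega) (by omega)]
      omega
  have hB : PySem.List.pyGetD grid ((j : Nat) : Int) 0 = grid[j]! := by
    rw [PySem.List.pyGetD_eq_getElem grid 0 (by omega) (by exact_mod_cast hjlt)]
    simp [List.getElem!_eq_getElem?_getD, List.getElem?_eq_getElem hjlt]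
  have hA : PySem.List.pyGetD grid task 0 = grid[j]! := by
    rcases lt_or_ge task 0 with hneg | hpos
    · rw [show task = -(((-task).toNat : Nat) : Int) by omega,
        PySem.List.pyGetD_neg_natCast grid _ 0 (by omega) (by omega)]
      have hj' : grid.length - (-task).toNat = j := by
        rw [hjdef]; simp only [if_pos (show task < 0 by omega)]; omega
      simp [hj', List.getElem!_eq_getElem?_getD, List.getElem?_eq_getElem hjlt]
    · rw [← hB]; congr 1; rw [hjdef]; simp only [if_neg (by omega : ¬ task < 0)]; omega
  have hAB : PySem.List.pyGetD grid task 0 = PySem.List.pyGetD grid ((j : Nat) : Int) 0 :=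
    hA.trans hB.symm
  have hset : ∀ ns : Int, PySem.List.pySetD grid task ns = grid.set j ns := by
    intro ns
    rcases lt_or_ge task 0 with hneg | hpos
    · simp only [PySem.List.pySetD, PySem.List.pySet?, PySem.List.pyIdx?,
        if_neg (by omega : ¬ (0:Int) ≤ task), if_pos (show -(grid.length : Int) ≤ task from hlo)]
      simp only [Option.map_some, Option.getD_some]
      congr 1
      rw [hjdef]; simp only [if_pos hneg]; omega
    · simp only [PySem.List.pySetD, PySem.List.pySet?, PySem.List.pyIdx?,
        if_pos (show (0:Int) ≤ task from hpos), if_pos (show task < (grid.length : Int) from hhi)]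
      simp only [Option.map_some, Option.getD_some]
      congr 1
      rw [hjdef]; simp only [if_neg (by omega : ¬ task < 0)]
  -- each candidate fitness in A equals B's delta-adjusted fitness
  have hcand : ∀ ns : Int,
      calculate_fitness (PySem.List.pySetD grid task ns) task_demands max_resources
        = -(pvPenalty (pvBump (pvBump (pvUsage grid task_demands)
            (PySem.List.pyGetD grid (PySem.Int.mod task (grid.length : Int)) 0)
            (-(PySem.List.pyGetD task_demands (PySem.Int.mod task (grid.length : Int)) 0)))
            ns (PySem.List.pyGetD task_demands (PySem.Int.mod task (grid.length : Int)) 0)) max_resources) := by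
    intro ns
    rw [hmod, hset ns]
    have hu := pvUsage_set task_demands grid j 0 [0,0,0] ns hjlt
    simp only [Nat.zero_add] at hu
    simp only [calculate_fitness, pvUsage]
    rw [hu, hB]
  -- base fitness agrees definitionally; unroll the 3-candidate loop and rewrite
  have hR : PySem.List.pyRange 0 3 1 = [0, 1, 2] := by decide
  simp only [update_cell, update_cell_alt, hR, List.foldl_cons, List.foldl_nil,
    calculate_fitness, hmod, hAB]
  have h0 := hcand 0; have h1 := hcand 1; have h2 := hcand 2
  simp only [calculate_fitness, hmod] at h0 h1 h2
  rw [h0, h1, h2]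

-- ===== VERDICT (by name: the statement is the Claim_ definition above) =====
theorem update_cell_spec : Claim_equal_update_cell := by
  intro task grid td mr lir _hdom hpre
  exact update_cell_eq_alt task grid td mr lir hpre
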